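-- pv_equiv track=rewrite | github.com/kenexxx/lab_algorytm | konoplenko_lab8.py | intersect_bruteforce
-- ===== SOURCE A (Python) =====
-- def intersect_bruteforce(A, B):
--     intersection = []
--     iterations = 0
--     for a in A:
--         for b in B:
--             iterations += 1
--             if a == b:
--                 intersection.append(a)
--                 break
--     return intersection, iterations
-- ===== SOURCE B (Python) =====
-- def intersect_bruteforce(A, B):
--     pos = {}
--     for i, b in enumerate(B):
--         pos.setdefault(b, i)
--     intersection = []
--     iterations = 0
--     n = len(B)
--     for a in A:
--         j = pos.get(a)
--         if j is None:
--             iterations += n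
--         else:
--             iterations += j + 1
--             intersection.append(a)
--     return intersection, iterations
-- ===== Notes on version B (the rewrite author's own statement) =====
-- stated objective: faster
-- what changed: Replaces the inner linear scan of B for every element of A by a first-occurrence index dict built once over B; each a in A is then a single hash lookup whose stored index reproduces the comparison count.
import Mathlib
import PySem

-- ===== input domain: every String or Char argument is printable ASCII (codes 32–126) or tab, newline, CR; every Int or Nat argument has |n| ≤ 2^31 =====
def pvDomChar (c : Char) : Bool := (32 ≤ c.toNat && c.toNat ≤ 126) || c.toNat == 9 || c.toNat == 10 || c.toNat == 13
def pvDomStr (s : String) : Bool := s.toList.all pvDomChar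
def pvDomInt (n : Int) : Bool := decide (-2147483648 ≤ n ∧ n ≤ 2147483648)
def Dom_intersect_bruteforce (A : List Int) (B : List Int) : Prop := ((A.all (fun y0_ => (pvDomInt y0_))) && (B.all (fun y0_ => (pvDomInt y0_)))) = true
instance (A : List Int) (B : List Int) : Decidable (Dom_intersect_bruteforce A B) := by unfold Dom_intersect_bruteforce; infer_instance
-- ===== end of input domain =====

-- B replaces A's inner scan of B by a first-occurrence index dict built once; faster in a timing run (asymptotic mechanism).


-- ===== PORT A =====
-- inner 'for b in B' loop with break: returns (found?, comparisons spent)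
def pvInnerA (a : Int) : List Int → Bool × Int
  | [] => (false, 0)
  | b :: bs => if a = b then (true, 1) else ((pvInnerA a bs).1, (pvInnerA a bs).2 + 1)

def intersect_bruteforce (A : List Int) (B : List Int) : List Int × Int :=
  A.foldl (fun st a =>
    let r := pvInnerA a B
    (if r.1 then st.1 ++ [a] else st.1, st.2 + r.2)) ([], 0)

-- ===== PORT B =====
def intersect_bruteforce_alt (A : List Int) (B : List Int) : List Int × Int :=
  let pos := (PySem.List.enumerate B 0).foldl (fun d p => d.setdefault p.2 p.1) PySem.Dict.empty
  let n := PySem.List.len B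
  A.foldl (fun st a =>
    match pos.get? a with
    | none => (st.1, st.2 + n)
    | some j => (st.1 ++ [a], st.2 + j + 1)) ([], 0)

-- ===== PRECONDITION & SPEC =====
def Spec_intersect_bruteforce (A : List Int) (B : List Int) (out : List Int × Int) : Prop := out = intersect_bruteforce_alt A B
instance (A : List Int) (B : List Int) (out : List Int × Int) : Decidable (Spec_intersect_bruteforce A B out) := by unfold Spec_intersect_bruteforce; infer_instance

-- ===== CLAIM (what is proved, stated in full; the proofs are below) =====
def Claim_equal_intersect_bruteforce : Prop := ∀ (A : List Int) (B : List Int), Dom_intersect_bruteforce A B → Spec_intersect_bruteforce A B (intersect_bruteforce A B)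

-- ===== LEMMAS AND PROOFS =====

-- if the inner loop finds no match it spends exactly len(B) comparisons
theorem pvInnerA_false (a : Int) (B : List Int) (h : (pvInnerA a B).1 = false) :
    (pvInnerA a B).2 = (B.length : Int) := by
  induction B with
  | nil => simp [pvInnerA]
  | cons b bs ih =>
    by_cases hab : a = b
    · simp [pvInnerA, hab] at h
    · simp only [pvInnerA, if_neg hab] at h ⊢
      rw [ih h]
      simp only [List.length_cons]
      push_cast
      ring

-- lookup in a setdefault-built dict = original lookup, else first match in the pair list
theorem pvFold_get? (l : List (Int × Int)) (d : PySem.Dict Int Int) (a : Int) :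
    ((l.foldl (fun d p => d.setdefault p.2 p.1) d).get? a)
      = Option.or (d.get? a) ((l.find? (fun p => p.2 == a)).map (·.1)) := by
  induction l generalizing d with
  | nil => simp
  | cons p rest ih =>
    obtain ⟨i, b⟩ := p
    simp only [List.foldl_cons, List.find?_cons]
    rw [ih]
    cases hba : (b == a) with
    | false =>
      have hab : b ≠ a := by simpa using hba
      by_cases hc : d.contains b
      · rw [PySem.Dict.setdefault_of_contains d i hc]
      · rw [PySem.Dict.setdefault_of_not_contains d i (by simpa using hc),
            PySem.Dict.get?_insert d b a i, if_neg (fun h => hab h.symm)]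
    | true =>
      have hab : b = a := by simpa using hba
      subst hab
      simp only [Option.map_some]
      by_cases hc : d.contains b
      · rw [PySem.Dict.setdefault_of_contains d i hc]
        have hs : (d.get? b).isSome := by
          rw [← PySem.Dict.contains_eq_isSome_get? d b]; exact hc
        obtain ⟨v, hv⟩ := Option.isSome_iff_exists.mp hs
        simp [hv]
      · rw [PySem.Dict.setdefault_of_not_contains d i (by simpa using hc),
            PySem.Dict.get?_insert d b b i, if_pos rfl]
        have hn : d.get? b = none := by
          have h2 := PySem.Dict.contains_eq_isSome_get? d b
          rw [eq_false_of_ne_true hc] at h2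
          cases h : d.get? b
          · rfl
          · rw [h] at h2; simp at h2
        simp [hn]

-- first index in enumerate B s matching a, expressed by the inner loop of A
theorem pvFind_enumerate (B : List Int) (a : Int) (s : Int) :
    ((PySem.List.enumerate B s).find? (fun p => p.2 == a)).map (·.1)
      = (if (pvInnerA a B).1 then some (s + (pvInnerA a B).2 - 1) else none) := by
  induction B generalizing s with
  | nil => simp [PySem.List.enumerate_nil, pvInnerA]
  | cons b bs ih =>
    rw [PySem.List.enumerate_cons, List.find?_cons]
    by_cases hab : a = b
    · subst hab
      simp [pvInnerA]
    · have hba : (b == a) = false := by simp [Ne.symm hab]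
      rw [hba]
      simp only [pvInnerA, if_neg hab]
      rw [ih (s + 1)]
      by_cases hf : (pvInnerA a bs).1
      · simp only [hf, if_true]
        congr 1
        ring
      · simp [hf]

-- ===== VERDICT (by name: the statement is the Claim_ definition above) =====
theorem intersect_bruteforce_spec : Claim_equal_intersect_bruteforce := by
  intro A B _
  unfold Spec_intersect_bruteforce intersect_bruteforce intersect_bruteforce_alt
  simp only []
  congr 1
  funext st a
  have hget : ((PySem.List.enumerate B 0).foldl (fun d p => d.setdefault p.2 p.1)
      PySem.Dict.empty).get? a
      = (if (pvInnerA a B).1 then some (0 + (pvInnerA a B).2 - 1) else none) := by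
    rw [pvFold_get?, pvFind_enumerate]
    simp
  by_cases hf : (pvInnerA a B).1
  · rw [hget]
    simp only [hf, if_true]
    exact Prod.ext_iff.mpr ⟨rfl, by ring⟩
  · rw [hget]
    simp only [hf, if_false, Bool.false_eq_true]
    have := pvInnerA_false a B (by simpa using hf)
    simp [this, PySem.List.len]
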